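-- pv_equiv track=rewrite | github.com/colaberry/WorldOfTaxonomy | scripts/build_static_content.py | _chunk_by_top_level
-- ===== SOURCE A (Python) =====
-- MAX_FILE_BYTES = 5 * 1024 * 1024
--
-- def _chunk_by_top_level(content: str) -> list[tuple[str, str]]:
--     """Group lines into <5MB chunks keyed by the first 1-3 chars of the code."""
--     by_first: dict[str, list[str]] = {}
--     for line in content.splitlines():
--         if not line.startswith("["):
--             continue
--         code = line[1:].split("]", 1)[0]
--         key = (code[:1] or "_").upper()
--         by_first.setdefault(key, []).append(line)
--
--     out: list[tuple[str, str]] = []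
--     for key, lines in sorted(by_first.items()):
--         text = "\n".join(lines) + "\n"
--         if len(text.encode("utf-8")) <= MAX_FILE_BYTES:
--             out.append((_safe_key(key), text))
--             continue
--         # Sub-chunk by two chars when one prefix is too big.
--         sub: dict[str, list[str]] = {}
--         for ln in lines:
--             code = ln[1:].split("]", 1)[0]
--             sk = (code[:2] or code or "_").upper()
--             sub.setdefault(sk, []).append(ln)
--         for sk, slines in sorted(sub.items()):
--             out.append((_safe_key(sk), "\n".join(slines) + "\n"))
--     return out
--
-- def _safe_key(key: str) -> str:
--     """Make a code prefix filesystem-safe."""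
--     return "".join(c if c.isalnum() else "_" for c in key) or "_"
-- ===== SOURCE B (Python) =====
-- # B: instead of one-pass dict-of-lists grouping, compute the sorted set of keys
-- # and emit each group by filtering the lines per key (filter-per-key; simpler,
-- # no dict bookkeeping; same output, not faster).
-- MAX_FILE_BYTES = 5 * 1024 * 1024
--
-- def _key(ln: str, width: int) -> str:
--     code = ln[1:].split("]", 1)[0]
--     return (code[:width] or code or "_").upper()
--
-- def _safe_key(key: str) -> str:
--     return "".join(c if c.isalnum() else "_" for c in key) or "_"
--
-- def _emit(k: str, group: list[str]) -> list[tuple[str, str]]: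
--     text = "\n".join(group) + "\n"
--     if len(text.encode("utf-8")) <= MAX_FILE_BYTES:
--         return [(_safe_key(k), text)]
--     return [(_safe_key(sk), "\n".join([ln for ln in group if _key(ln, 2) == sk]) + "\n")
--             for sk in sorted({_key(ln, 2) for ln in group})]
--
-- def _chunk_by_top_level(content: str) -> list[tuple[str, str]]:
--     lines = [ln for ln in content.splitlines() if ln.startswith("[")]
--     chunks: list[tuple[str, str]] = []
--     for k in sorted({_key(ln, 1) for ln in lines}):
--         chunks.extend(_emit(k, [ln for ln in lines if _key(ln, 1) == k]))
--     return chunks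
-- ===== Notes on version B (the rewrite author's own statement) =====
-- stated objective: simpler
-- what changed: Replaces the dict-of-lists grouping (setdefault/append passes at both levels) by computing the sorted set of keys and emitting each group by filtering the lines per key; same output, no dict bookkeeping.
import Mathlib
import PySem

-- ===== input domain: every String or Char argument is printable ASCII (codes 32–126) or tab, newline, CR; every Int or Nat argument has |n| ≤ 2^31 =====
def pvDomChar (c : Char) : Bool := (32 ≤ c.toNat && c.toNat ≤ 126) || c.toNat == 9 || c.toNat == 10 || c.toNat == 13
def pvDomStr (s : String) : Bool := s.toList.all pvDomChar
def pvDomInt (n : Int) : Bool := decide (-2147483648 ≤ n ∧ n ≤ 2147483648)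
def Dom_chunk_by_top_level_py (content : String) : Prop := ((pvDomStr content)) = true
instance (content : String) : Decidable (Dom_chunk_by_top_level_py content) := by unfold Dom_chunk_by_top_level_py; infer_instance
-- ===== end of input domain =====

-- B replaces A's dict-of-lists grouping by a sorted key set plus a filter per key: simpler, same output (not faster).

-- shared helpers: subexpressions both Pythons compute verbatim
-- code = line[1:].split("]", 1)[0]
def pvCode (line : String) : String :=
  ((PySem.Str.splitMax? (PySem.Str.slice line (some 1) none) "]" 1).getD []).headD ""

-- _safe_key: "".join(c if c.isalnum() else "_" for c in key) or "_"
def pvSafeKey (key : String) : String :=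
  let t := PySem.Str.join "" (key.toList.map (fun c => if PySem.Chars.isalnum c then String.singleton c else "_"))
  if t = "" then "_" else t

-- ===== PORT A =====
-- A's outer key: (code[:1] or "_").upper()
def pvKeyA1 (line : String) : String :=
  let code := pvCode line
  let c1 := PySem.Str.slice code none (some 1)
  PySem.Str.upper (if c1 = "" then "_" else c1)

-- B's _key(ln, w): (code[:w] or code or "_").upper(); for w = 2 it is verbatim A's sub-key expression
def pvKeyB (line : String) (w : Int) : String :=
  let code := pvCode line
  let cw := PySem.Str.slice code none (some w)
  PySem.Str.upper (if cw = "" then (if code = "" then "_" else code) else cw)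

-- len(text.encode("utf-8")) is the char count on the ASCII domain Dom; sorted(d.items()) compares
-- pairs, which on a dict's distinct keys is sorting by the key (Prod.fst).
def chunk_by_top_level_py (content : String) : List (String × String) :=
  let byFirst : PySem.Dict String (List String) :=
    (PySem.Str.splitlines content).foldl (fun d line =>
      if PySem.Str.startswith line "[" then
        let key := pvKeyA1 line
        d.insert key (d.getD key [] ++ [line])
      else d) PySem.Dict.empty
  (PySem.List.sorted byFirst.items Prod.fst false).foldl (fun out kv =>
    let text := PySem.Str.join "\n" kv.2 ++ "\n"
    if PySem.Str.len text ≤ 5242880 then out ++ [(pvSafeKey kv.1, text)]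
    else
      let sub : PySem.Dict String (List String) :=
        kv.2.foldl (fun d ln =>
          let sk := pvKeyB ln 2
          d.insert sk (d.getD sk [] ++ [ln])) PySem.Dict.empty
      (PySem.List.sorted sub.items Prod.fst false).foldl (fun o sv =>
        o ++ [(pvSafeKey sv.1, PySem.Str.join "\n" sv.2 ++ "\n")]) out) []

-- ===== PORT B =====
def pvEmit (k : String) (group : List String) : List (String × String) :=
  let text := PySem.Str.join "\n" group ++ "\n"
  if PySem.Str.len text ≤ 5242880 then [(pvSafeKey k, text)]
  else (PySem.List.sorted (PySem.Set.ofList (group.map (pvKeyB · 2))) (fun x => x) false).map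
    (fun sk => (pvSafeKey sk, PySem.Str.join "\n" (group.filter (fun ln => pvKeyB ln 2 == sk)) ++ "\n"))

def chunk_by_top_level_py_alt (content : String) : List (String × String) :=
  let lines := (PySem.Str.splitlines content).filter (fun ln => PySem.Str.startswith ln "[")
  (PySem.List.sorted (PySem.Set.ofList (lines.map (pvKeyB · 1))) (fun k => k) false).flatMap
    (fun k => pvEmit k (lines.filter (fun ln => pvKeyB ln 1 == k)))

-- ===== PRECONDITION & SPEC =====
def Spec_chunk_by_top_level_py (content : String) (out : List (String × String)) : Prop := out = chunk_by_top_level_py_alt content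
instance (content : String) (out : List (String × String)) : Decidable (Spec_chunk_by_top_level_py content out) := by unfold Spec_chunk_by_top_level_py; infer_instance

-- ===== CLAIM (what is proved, stated in full; the proofs are below) =====
def Claim_equal_chunk_by_top_level_py : Prop := ∀ (content : String), Dom_chunk_by_top_level_py content → Spec_chunk_by_top_level_py content (chunk_by_top_level_py content)

-- ===== LEMMAS AND PROOFS =====

-- generic grouping step: "if f(x) is a key k: d.setdefault(k, []).append(x)"
def pvGStep (f : String → Option String) (d : PySem.Dict String (List String)) (x : String) :
    PySem.Dict String (List String) :=
  match f x with
  | none => d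
  | some k => d.insert k (d.getD k [] ++ [x])

-- A's outer loop test-and-key as one optional-key function
def pvFOuter (x : String) : Option String :=
  if PySem.Str.startswith x "[" then some (pvKeyB x 1) else none

-- A's per-group emission (the body of A's outer output loop, as a function of one (key, lines) pair)
def pvBigA (kv : String × List String) : List (String × String) :=
  let text := PySem.Str.join "\n" kv.2 ++ "\n"
  if PySem.Str.len text ≤ 5242880 then [(pvSafeKey kv.1, text)]
  else (PySem.List.sorted ((kv.2.foldl (fun d ln =>
          d.insert (pvKeyB ln 2) (d.getD (pvKeyB ln 2) [] ++ [ln])) PySem.Dict.empty).items) Prod.fst false).map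
        (fun sv => (pvSafeKey sv.1, PySem.Str.join "\n" sv.2 ++ "\n"))

theorem pvSlice_take_empty (s : String) (w : Nat) (hw : 0 < w) :
    PySem.Str.slice s none (some (w : Int)) = "" ↔ s = "" := by
  constructor
  · intro h
    have := congrArg String.toList h
    simp [PySem.List.slice_to_natCast] at this
    rcases this with h1 | h1
    · omega
    · exact String.toList_inj.mp (by simp [h1])
  · intro h
    subst h
    apply String.toList_inj.mp
    simp [PySem.List.slice_to_natCast]

theorem pvKey1_eq (l : String) : pvKeyA1 l = pvKeyB l 1 := by
  unfold pvKeyA1 pvKeyB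
  by_cases h : pvCode l = ""
  · have h1 : PySem.Str.slice (pvCode l) none (some 1) = "" := by
      have := (pvSlice_take_empty (pvCode l) 1 (by norm_num)).mpr h
      simpa using this
    simp [h, h1]
  · have h1 : PySem.Str.slice (pvCode l) none (some 1) ≠ "" := by
      intro hc
      exact h ((pvSlice_take_empty (pvCode l) 1 (by norm_num)).mp (by simpa using hc))
    simp [h1]

theorem pvGetD_gfold (f : String → Option String) (ls : List String) :
    ∀ (d : PySem.Dict String (List String)) (k : String),
      (ls.foldl (pvGStep f) d).getD k [] = d.getD k [] ++ ls.filter (fun x => f x == some k) := by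
  induction ls with
  | nil => intro d k; simp
  | cons x ls ih =>
    intro d k
    simp only [List.foldl_cons, List.filter_cons]
    cases hfx : f x with
    | none => simp [pvGStep, hfx, ih]
    | some j =>
      by_cases hkj : j = k
      · subst hkj
        simp [pvGStep, hfx, ih]
      · simp [pvGStep, hfx, ih, PySem.Dict.getD_insert, hkj, Ne.symm hkj]

theorem pvKeys_gfold (f : String → Option String) (ls : List String) :
    ∀ (d : PySem.Dict String (List String)),
      (ls.foldl (pvGStep f) d).keys = PySem.Set.update d.keys (ls.filterMap f) := by
  induction ls with
  | nil => intro d; simp [PySem.Set.update]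
  | cons x ls ih =>
    intro d
    simp only [List.foldl_cons, List.filterMap_cons]
    cases hfx : f x with
    | none => simp [pvGStep, hfx, ih]
    | some j =>
      have hk : (d.insert j (d.getD j [] ++ [x])).keys = PySem.Set.add d.keys j := by
        by_cases hc : d.contains j = true
        · rw [PySem.Dict.keys_insert_of_contains d _ hc]
          simp [PySem.Set.add, PySem.Dict.contains_eq_decide_mem_keys] at hc ⊢
          simp [hc]
        · rw [PySem.Dict.keys_insert_of_not_contains d _ (by simpa using hc)]
          simp [PySem.Set.add, PySem.Dict.contains_eq_decide_mem_keys] at hc ⊢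
          simp [hc]
      simp [pvGStep, hfx, ih, hk, PySem.Set.update]

theorem pvNodup_gfold (f : String → Option String) (ls : List String) :
    ∀ (d : PySem.Dict String (List String)), d.keys.Nodup → (ls.foldl (pvGStep f) d).keys.Nodup := by
  induction ls with
  | nil => intro d hd; simpa
  | cons x ls ih =>
    intro d hd
    simp only [List.foldl_cons]
    cases hfx : f x with
    | none => simp only [pvGStep, hfx]; exact ih d hd
    | some j => simp only [pvGStep, hfx]; exact ih _ (PySem.Dict.nodup_keys_insert _ _ _ hd)

theorem pvSorted_gfold_items (f : String → Option String) (ls : List String) :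
    PySem.List.sorted ((ls.foldl (pvGStep f) PySem.Dict.empty).items) Prod.fst false
      = (PySem.List.sorted (PySem.Set.ofList (ls.filterMap f)) (fun k => k) false).map
          (fun k => (k, ls.filter (fun x => f x == some k))) := by
  have hnd : (ls.foldl (pvGStep f) PySem.Dict.empty).keys.Nodup :=
    pvNodup_gfold f ls _ PySem.Dict.nodup_keys_empty
  have hkeys : (ls.foldl (pvGStep f) PySem.Dict.empty).keys = PySem.Set.ofList (ls.filterMap f) := by
    rw [pvKeys_gfold]
    simp [PySem.Set.update, PySem.Set.ofList_eq_foldl, PySem.Dict.keys_empty]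
  have hitems : (ls.foldl (pvGStep f) PySem.Dict.empty).items
      = (PySem.Set.ofList (ls.filterMap f)).map (fun k => (k, ls.filter (fun x => f x == some k))) := by
    rw [PySem.Dict.items_eq_map_keys _ hnd [], hkeys]
    refine List.map_congr_left (fun k _ => ?_)
    rw [pvGetD_gfold]
    simp
  apply PySem.List.sorted_eq_of_perm_of_pairwise_lt
  · rw [hitems]
    exact (PySem.List.sorted_perm (PySem.Set.ofList (ls.filterMap f)) (fun k => k) false).map _
  · have hp := PySem.List.sorted_ofList_pairwise_lt (ls.filterMap f)
    exact (List.pairwise_map).mpr (by simpa using hp)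

theorem pvFilterMap_fOuter (sl : List String) :
    sl.filterMap pvFOuter
      = (sl.filter (fun ln => PySem.Str.startswith ln "[")).map (fun ln => pvKeyB ln 1) := by
  induction sl with
  | nil => rfl
  | cons x sl ih =>
    by_cases h : PySem.Str.startswith x "[" = true
    · have h1 : pvFOuter x = some (pvKeyB x 1) := by unfold pvFOuter; rw [if_pos h]
      rw [List.filterMap_cons_some h1,
          List.filter_cons_of_pos (p := fun ln => PySem.Str.startswith ln "[") h,
          List.map_cons, ih]
    · have h1 : pvFOuter x = none := by unfold pvFOuter; rw [if_neg h]
      rw [List.filterMap_cons_none h1,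
          List.filter_cons_of_neg (p := fun ln => PySem.Str.startswith ln "[") h, ih]

theorem pvFilter_fOuter (sl : List String) (k : String) :
    sl.filter (fun x => pvFOuter x == some k)
      = (sl.filter (fun ln => PySem.Str.startswith ln "[")).filter (fun ln => pvKeyB ln 1 == k) := by
  rw [List.filter_filter]
  refine List.filter_congr (fun x _ => ?_)
  unfold pvFOuter
  cases h : PySem.Str.startswith x "[" with
  | true => rw [Bool.and_true]; simp
  | false => rw [Bool.and_false]; simp

set_option maxHeartbeats 1000000 in
theorem pvBigA_eq_emit (k : String) (grp : List String) : pvBigA (k, grp) = pvEmit k grp := by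
  have hfold2 : (fun (d : PySem.Dict String (List String)) ln =>
      d.insert (pvKeyB ln 2) (d.getD (pvKeyB ln 2) [] ++ [ln]))
      = pvGStep (fun x => some (pvKeyB x 2)) := by
    funext d ln; rfl
  have h1 : grp.filterMap (fun x => some (pvKeyB x 2)) = grp.map (fun x => pvKeyB x 2) := by
    induction grp with
    | nil => rfl
    | cons y t ih => simp [ih]
  simp only [pvBigA, pvEmit]
  by_cases hc : PySem.Str.len (PySem.Str.join "\n" grp ++ "\n") ≤ 5242880
  · rw [if_pos hc, if_pos hc]
  · rw [if_neg hc, if_neg hc, hfold2, pvSorted_gfold_items, h1, List.map_map]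
    refine List.map_congr_left (fun sk _ => ?_)
    have hp : (fun x => some (pvKeyB x 2) == some sk) = (fun ln => pvKeyB ln 2 == sk) :=
      funext fun x => Option.some_beq_some
    simp only [Function.comp]
    rw [hp]

set_option maxHeartbeats 1000000 in
theorem chunk_by_top_level_py_eq_flat (content : String) :
    chunk_by_top_level_py content
      = List.flatMap
          (fun k => pvBigA (k, (PySem.Str.splitlines content).filter (fun x => pvFOuter x == some k)))
          (PySem.List.sorted
            (PySem.Set.ofList ((PySem.Str.splitlines content).filterMap pvFOuter)) (fun k => k) false) := by
  have hfold : (fun (d : PySem.Dict String (List String)) line =>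
      if PySem.Str.startswith line "[" = true then
        d.insert (pvKeyA1 line) (d.getD (pvKeyA1 line) [] ++ [line])
      else d) = pvGStep pvFOuter := by
    funext d line
    by_cases h : PySem.Chars.startswith line.toList ['['] = true <;>
      simp [pvGStep, pvFOuter, h, pvKey1_eq]
  have hbig : (fun (out : List (String × String)) (kv : String × List String) =>
      if PySem.Str.len (PySem.Str.join "\n" kv.2 ++ "\n") ≤ 5242880 then
        out ++ [(pvSafeKey kv.1, PySem.Str.join "\n" kv.2 ++ "\n")]
      else
        List.foldl (fun o sv => o ++ [(pvSafeKey sv.1, PySem.Str.join "\n" sv.2 ++ "\n")]) out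
          (PySem.List.sorted
            ((kv.2.foldl (fun d ln => d.insert (pvKeyB ln 2) (d.getD (pvKeyB ln 2) [] ++ [ln]))
              PySem.Dict.empty).items) Prod.fst false))
      = (fun out kv => out ++ pvBigA kv) := by
    funext out kv
    by_cases hc : PySem.Str.len (PySem.Str.join "\n" kv.2 ++ "\n") ≤ 5242880
    · simp only [pvBigA, hc, if_true]
    · simp only [pvBigA, hc, if_false]
      exact PySem.List.foldl_append_singleton_eq_map _ _ _
  simp only [chunk_by_top_level_py]
  rw [hfold, hbig, pvSorted_gfold_items, PySem.List.foldl_append_eq_flatMap, List.flatMap_map]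
  rfl

theorem chunk_alt_eq_flat (content : String) :
    chunk_by_top_level_py_alt content
      = List.flatMap
          (fun k => pvEmit k (((PySem.Str.splitlines content).filter
              (fun ln => PySem.Str.startswith ln "[")).filter (fun ln => pvKeyB ln 1 == k)))
          (PySem.List.sorted
            (PySem.Set.ofList (((PySem.Str.splitlines content).filter
              (fun ln => PySem.Str.startswith ln "[")).map (fun ln => pvKeyB ln 1))) (fun k => k) false) := rfl

-- ===== VERDICT (by name: the statement is the Claim_ definition above) =====
theorem chunk_by_top_level_py_spec : Claim_equal_chunk_by_top_level_py := by
  intro content _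
  unfold Spec_chunk_by_top_level_py
  rw [chunk_by_top_level_py_eq_flat, chunk_alt_eq_flat, ← pvFilterMap_fOuter]
  have hf : (fun k => pvBigA (k, (PySem.Str.splitlines content).filter (fun x => pvFOuter x == some k)))
      = (fun k => pvEmit k (((PySem.Str.splitlines content).filter
          (fun ln => PySem.Str.startswith ln "[")).filter (fun ln => pvKeyB ln 1 == k))) := by
    funext k
    rw [pvFilter_fOuter, pvBigA_eq_emit]
  rw [hf]
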